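-- pv_equiv track=rewrite | github.com/lbcb-sci/DipGNNome | decoding/graph_walk.py | remove_complement_pairs_from_path
-- ===== SOURCE A (Python) =====
-- def remove_complement_pairs_from_path(path):
--     """
--     Remove complement pairs from a path and return the longest contiguous subpath without complement issues.
--
--     Args:
--         path: List of nodes representing the path
--
--     Returns:
--         tuple: (chopped_path, removed_pairs_count) where chopped_path is the longest valid subpath
--                and removed_pairs_count is the number of complement pairs that were found
--     """
--     if len(path) <= 1:
--         return path, 0
--
--     # Find all complement pairs in the path
--     complement_pairs = []
--     for i in range(len(path)):
--         for j in range(i+1, len(path)):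
--             if path[i] == path[j]^1:
--                 complement_pairs.append((i, j))
--
--     if not complement_pairs:
--         return path, 0
--
--     # If we have complement pairs, we need to find the longest contiguous subpath
--     # that doesn't contain any complement pairs
--
--     # Create a set of all indices that are part of complement pairs
--     problematic_indices = set()
--     for i, j in complement_pairs:
--         problematic_indices.add(i)
--         problematic_indices.add(j)
--
--     # Find all contiguous ranges that don't contain problematic indices
--     valid_ranges = []
--     start = 0
--
--     for i in range(len(path)):
--         if i in problematic_indices:
--             # End current range if it exists
--             if i > start:
--                 valid_ranges.append((start, i-1))
--             start = i + 1
--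
--     # Add final range if it exists
--     if start < len(path):
--         valid_ranges.append((start, len(path)-1))
--
--     # Find the longest valid range
--     if not valid_ranges:
--         # All nodes are problematic, return empty path
--         return [], len(complement_pairs)
--
--     longest_range = max(valid_ranges, key=lambda x: x[1] - x[0])
--     start_idx, end_idx = longest_range
--
--     # Extract the longest valid subpath
--     chopped_path = path[start_idx:end_idx + 1]
--
--     return chopped_path, len(complement_pairs)
-- ===== SOURCE B (Python) =====
-- def remove_complement_pairs_from_path(path):
--     if len(path) <= 1:
--         return path, 0
--     # one pass: count pairs incrementally with a dict of counts seen so far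
--     seen = {}
--     pairs = 0
--     for v in path:
--         pairs += seen.get(v ^ 1, 0)
--         seen[v] = seen.get(v, 0) + 1
--     if pairs == 0:
--         return path, 0
--     # one pass: an index is problematic iff its complement occurs anywhere;
--     # track the current clean run and keep the first longest one
--     best_len = 0
--     best_start = 0
--     run_start = 0
--     for i, v in enumerate(path):
--         if seen.get(v ^ 1, 0) > 0:
--             run_start = i + 1
--         elif i - run_start + 1 > best_len:
--             best_len = i - run_start + 1
--             best_start = run_start
--     return path[best_start:best_start + best_len], pairs
-- ===== Notes on version B (the rewrite author's own statement) =====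
-- stated objective: faster
-- what changed: Replaces A's O(n^2) nested scan that materialises all complement index pairs (and its set/range bookkeeping) with one dict-counting pass that tallies pairs incrementally via counts of previously seen complements, plus one linear scan keeping the first longest run of indices whose complement value never occurs.
import Mathlib
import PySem

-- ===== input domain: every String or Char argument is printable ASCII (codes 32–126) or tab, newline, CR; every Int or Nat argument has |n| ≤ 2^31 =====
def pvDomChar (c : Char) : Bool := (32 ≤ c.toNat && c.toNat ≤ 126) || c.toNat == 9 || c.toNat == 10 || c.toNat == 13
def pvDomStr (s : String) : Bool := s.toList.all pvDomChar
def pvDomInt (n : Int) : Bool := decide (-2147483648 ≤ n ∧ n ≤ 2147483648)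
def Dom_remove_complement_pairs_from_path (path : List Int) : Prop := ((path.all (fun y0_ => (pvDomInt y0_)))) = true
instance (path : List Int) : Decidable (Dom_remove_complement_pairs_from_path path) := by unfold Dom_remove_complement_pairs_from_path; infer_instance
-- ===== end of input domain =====

-- B replaces A's quadratic nested pair scan by one counting pass over a dict plus one
-- linear best-run scan (objective: faster).

-- ===== PORT A =====
-- Literal port of A. Python's `x ^ 1` is PySem.Int.bxor x 1; `max(vr, key=...)` is
-- PySem.List.max? (first extremal element); its `none` case is Python's
-- `if not valid_ranges: return [], len(complement_pairs)` branch.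
def remove_complement_pairs_from_path (path : List Int) : List Int × Int :=
  if path.length ≤ 1 then (path, 0) else
  let n : Int := path.length
  let complement_pairs : List (Int × Int) :=
    (PySem.List.pyRange 0 n).foldl (fun acc i =>
      (PySem.List.pyRange (i + 1) n).foldl (fun acc2 j =>
        if PySem.List.pyGetD path i 0 = PySem.Int.bxor (PySem.List.pyGetD path j 0) 1
        then acc2 ++ [(i, j)] else acc2) acc) []
  if complement_pairs = [] then (path, 0) else
  let problematic : PySem.Set Int :=
    complement_pairs.foldl (fun s ij => PySem.Set.add (PySem.Set.add s ij.1) ij.2) PySem.Set.empty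
  let st : Int × List (Int × Int) :=
    (PySem.List.pyRange 0 n).foldl (fun st i =>
      if PySem.Set.contains problematic i then
        (i + 1, if st.1 < i then st.2 ++ [(st.1, i - 1)] else st.2)
      else st) (0, [])
  let valid_ranges : List (Int × Int) :=
    if st.1 < n then st.2 ++ [(st.1, n - 1)] else st.2
  match PySem.List.max? valid_ranges (fun x => x.2 - x.1) with
  | none => ([], (complement_pairs.length : Int))
  | some lr => (PySem.List.slice path (some lr.1) (some (lr.2 + 1)), (complement_pairs.length : Int))

-- ===== PORT B =====
-- Literal port of Source B: one dict-counting pass over the values (pairs are counted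
-- incrementally), then one scan over enumerate(path) keeping the first longest clean run.
def remove_complement_pairs_from_path_alt (path : List Int) : List Int × Int :=
  if path.length ≤ 1 then (path, 0) else
  let sp : PySem.Dict Int Int × Int :=
    path.foldl (fun sp v =>
      (sp.1.insert v (sp.1.getD v 0 + 1), sp.2 + sp.1.getD (PySem.Int.bxor v 1) 0))
      (PySem.Dict.empty, 0)
  let seen := sp.1
  let pairs := sp.2
  if pairs = 0 then (path, 0) else
  let st : Int × Int × Int :=
    (PySem.List.enumerate path).foldl (fun st iv =>
      if seen.getD (PySem.Int.bxor iv.2 1) 0 > 0 then (iv.1 + 1, st.2.1, st.2.2)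
      else if iv.1 - st.1 + 1 > st.2.1 then (st.1, iv.1 - st.1 + 1, st.1)
      else st) (0, 0, 0)
  (PySem.List.slice path (some st.2.2) (some (st.2.2 + st.2.1)), pairs)

-- ===== PRECONDITION & SPEC =====
def Spec_remove_complement_pairs_from_path (path : List Int) (out : List Int × Int) : Prop := out = remove_complement_pairs_from_path_alt path
instance (path : List Int) (out : List Int × Int) : Decidable (Spec_remove_complement_pairs_from_path path out) := by unfold Spec_remove_complement_pairs_from_path; infer_instance

-- ===== CLAIM (what is proved, stated in full; the proofs are below) =====
def Claim_equal_remove_complement_pairs_from_path : Prop := ∀ (path : List Int), Dom_remove_complement_pairs_from_path path → Spec_remove_complement_pairs_from_path path (remove_complement_pairs_from_path path)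

-- ===== LEMMAS AND PROOFS =====

-- `x ^ 1` never fixes a point and is an involution (Python-exact also on negatives).
theorem nat_xor_one_ne (m : Nat) (h : m ^^^ 1 = m) : False := by
  have h3 : m ^^^ (m ^^^ 1) = m ^^^ m := congrArg (m ^^^ ·) h
  rw [← Nat.xor_assoc, Nat.xor_self, Nat.zero_xor] at h3
  simp at h3

theorem bxor_one_ne (x : Int) : PySem.Int.bxor x 1 ≠ x := by
  unfold PySem.Int.bxor
  by_cases h : 0 ≤ x
  · simp only [h, if_pos, show (0:Int) ≤ 1 by norm_num]
    intro hc
    rw [show Int.toNat 1 = 1 from rfl] at hc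
    exact nat_xor_one_ne x.toNat (by omega)
  · simp only [h, if_false, if_pos, show (0:Int) ≤ 1 by norm_num]
    intro hc
    rw [show Int.toNat 1 = 1 from rfl] at hc
    exact nat_xor_one_ne (-x-1).toNat (by omega)

theorem bxor_one_invol (x : Int) : PySem.Int.bxor (PySem.Int.bxor x 1) 1 = x := by
  unfold PySem.Int.bxor
  by_cases h : 0 ≤ x
  · simp only [h, show (0:Int) ≤ 1 by norm_num, if_true, if_pos (Int.natCast_nonneg _)]
    have : ((x.toNat ^^^ (1:Int).toNat : Nat) : Int).toNat = x.toNat ^^^ (1:Int).toNat := by omega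
    rw [this, Nat.xor_assoc, Nat.xor_self, Nat.xor_zero]
    omega
  · have h1 : ¬ (0:Int) ≤ -((((-x - 1).toNat ^^^ (1:Int).toNat : Nat)):Int) - 1 := by omega
    simp only [h, show (0:Int) ≤ 1 by norm_num, if_true, if_false, h1]
    have : (-(-(((-x - 1).toNat ^^^ (1:Int).toNat : Nat) : Int) - 1) - 1).toNat = (-x-1).toNat ^^^ (1:Int).toNat := by omega
    rw [this, Nat.xor_assoc, Nat.xor_self, Nat.xor_zero]
    omega

-- Proof-side mirrors of the pieces of port A.
def cpA (path : List Int) : List (Int × Int) :=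
  (PySem.List.pyRange 0 (path.length : Int)).foldl (fun acc i =>
    (PySem.List.pyRange (i + 1) (path.length : Int)).foldl (fun acc2 j =>
      if PySem.List.pyGetD path i 0 = PySem.Int.bxor (PySem.List.pyGetD path j 0) 1
      then acc2 ++ [(i, j)] else acc2) acc) []

def probA (path : List Int) : PySem.Set Int :=
  (cpA path).foldl (fun s ij => PySem.Set.add (PySem.Set.add s ij.1) ij.2) PySem.Set.empty

-- generic run scanners over an index predicate
def stepA (f : Int → Bool) (st : Int × List (Int × Int)) (i : Int) : Int × List (Int × Int) :=
  if f i then (i + 1, if st.1 < i then st.2 ++ [(st.1, i - 1)] else st.2) else st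

def stepB (f : Int → Bool) (st : Int × Int × Int) (i : Int) : Int × Int × Int :=
  if f i then (i + 1, st.2.1, st.2.2)
  else if i - st.1 + 1 > st.2.1 then (st.1, i - st.1 + 1, st.1)
  else st

def upd (b : Int × Int) (r : Int × Int) : Int × Int :=
  if r.2 - r.1 + 1 > b.1 then (r.2 - r.1 + 1, r.1) else b

def bestOf (L : List (Int × Int)) : Int × Int := L.foldl upd (0, 0)

-- mirrors of the pieces of port B
def spB (path : List Int) : PySem.Dict Int Int × Int :=
  path.foldl (fun sp v =>
    (sp.1.insert v (sp.1.getD v 0 + 1), sp.2 + sp.1.getD (PySem.Int.bxor v 1) 0))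
    (PySem.Dict.empty, 0)

def stA (path : List Int) : Int × List (Int × Int) :=
  (PySem.List.pyRange 0 (path.length : Int)).foldl (fun st i =>
    if PySem.Set.contains (probA path) i then
      (i + 1, if st.1 < i then st.2 ++ [(st.1, i - 1)] else st.2)
    else st) (0, [])

def vrA (path : List Int) : List (Int × Int) :=
  if (stA path).1 < (path.length : Int) then (stA path).2 ++ [((stA path).1, (path.length : Int) - 1)] else (stA path).2

def stB (path : List Int) : Int × Int × Int :=
  (PySem.List.enumerate path).foldl (fun st iv =>
    if (spB path).1.getD (PySem.Int.bxor iv.2 1) 0 > 0 then (iv.1 + 1, st.2.1, st.2.2)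
    else if iv.1 - st.1 + 1 > st.2.1 then (st.1, iv.1 - st.1 + 1, st.1)
    else st) (0, 0, 0)

theorem portA_spec (path : List Int) (h : ¬ path.length ≤ 1) :
    remove_complement_pairs_from_path path =
      (if cpA path = [] then (path, 0) else
        match PySem.List.max? (vrA path) (fun x => x.2 - x.1) with
        | none => ([], ((cpA path).length : Int))
        | some lr => (PySem.List.slice path (some lr.1) (some (lr.2 + 1)), ((cpA path).length : Int))) := by
  unfold remove_complement_pairs_from_path
  rw [if_neg h]
  rfl

theorem portB_spec (path : List Int) (h : ¬ path.length ≤ 1) :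
    remove_complement_pairs_from_path_alt path =
      (if (spB path).2 = 0 then (path, 0) else
        (PySem.List.slice path (some (stB path).2.2) (some ((stB path).2.2 + (stB path).2.1)), (spB path).2)) := by
  unfold remove_complement_pairs_from_path_alt
  rw [if_neg h]
  rfl


-- closed form of A's nested pair-collecting loop
theorem cpA_eq (l : List Int) :
    cpA l = (PySem.List.pyRange 0 (l.length : Int)).flatMap (fun i =>
      ((PySem.List.pyRange (i + 1) (l.length : Int)).filter
        (fun j => decide (PySem.List.pyGetD l i 0 = PySem.Int.bxor (PySem.List.pyGetD l j 0) 1))).map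
        (fun j => (i, j))) := by
  unfold cpA
  rw [PySem.List.foldl_congr_mem _ _
      (fun acc i => acc ++ ((PySem.List.pyRange (i + 1) (l.length : Int)).filter
        (fun j => decide (PySem.List.pyGetD l i 0 = PySem.Int.bxor (PySem.List.pyGetD l j 0) 1))).map
        (fun j => (i, j))) _ ?_]
  · rw [PySem.List.foldl_append_eq_flatMap]
    simp
  · intro acc i _
    dsimp only
    rw [← PySem.List.foldl_append_if
        (fun j => decide (PySem.List.pyGetD l i 0 = PySem.Int.bxor (PySem.List.pyGetD l j 0) 1))
        (fun j => (i, j)) _ acc]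
    exact PySem.List.foldl_congr_mem _ _ _ _ (by intro a x _; simp)

theorem pyGetD_append_left (l : List Int) (v d : Int) (i : Int) (h0 : 0 ≤ i) (h1 : i < (l.length : Int)) :
    PySem.List.pyGetD (l ++ [v]) i d = PySem.List.pyGetD l i d := by
  rw [PySem.List.pyGetD_eq_getElem _ _ h0 (by simp; omega),
      PySem.List.pyGetD_eq_getElem _ _ h0 (by exact_mod_cast h1)]
  rw [List.getElem_append_left (by omega)]

theorem pyGetD_append_self (l : List Int) (v d : Int) :
    PySem.List.pyGetD (l ++ [v]) (l.length : Int) d = v := by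
  rw [PySem.List.pyGetD_eq_getElem _ _ (by positivity) (by simp)]
  simp

theorem count_eq_countP_range (l : List Int) (w : Int) :
    l.count w = (PySem.List.pyRange 0 (l.length : Int)).countP
      (fun i => decide (PySem.List.pyGetD l i 0 = w)) := by
  conv_lhs => rw [← PySem.List.map_pyGetD_pyRange_zero' l 0]
  rw [List.count_eq_countP, List.countP_map]
  rfl

theorem cpA_len_append (l : List Int) (v : Int) :
    (cpA (l ++ [v])).length = (cpA l).length + l.count (PySem.Int.bxor v 1) := by
  have hlen : (((l ++ [v]).length : Nat) : Int) = (l.length : Int) + 1 := by simp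
  rw [cpA_eq, cpA_eq, List.length_flatMap, List.length_flatMap]
  simp only [hlen, List.length_map]
  rw [PySem.List.pyRange_one_succ_right (by positivity)]
  rw [List.map_append, List.sum_append]
  have hlast : ([( (l.length : Int) )].map (fun i =>
      ((PySem.List.pyRange (i + 1) ((l.length : Int) + 1)).filter
        (fun j => decide (PySem.List.pyGetD (l ++ [v]) i 0
          = PySem.Int.bxor (PySem.List.pyGetD (l ++ [v]) j 0) 1))).length)).sum = 0 := by
    simp [PySem.List.pyRange_one_eq_nil (le_refl ((l.length : Int) + 1))]
  rw [hlast, Nat.add_zero]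
  have hterm : ∀ i ∈ PySem.List.pyRange 0 (l.length : Int),
      ((PySem.List.pyRange (i + 1) ((l.length : Int) + 1)).filter
        (fun j => decide (PySem.List.pyGetD (l ++ [v]) i 0
          = PySem.Int.bxor (PySem.List.pyGetD (l ++ [v]) j 0) 1))).length
      = ((PySem.List.pyRange (i + 1) (l.length : Int)).filter
        (fun j => decide (PySem.List.pyGetD l i 0
          = PySem.Int.bxor (PySem.List.pyGetD l j 0) 1))).length
        + (if decide (PySem.List.pyGetD l i 0 = PySem.Int.bxor v 1) then 1 else 0) := by
    intro i hi
    obtain ⟨hi0, hi1⟩ := PySem.List.mem_pyRange_one.mp hi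
    rw [PySem.List.pyRange_one_succ_right (by omega), List.filter_append, List.length_append]
    congr 1
    · refine congrArg List.length (List.filter_congr ?_)
      intro j hj
      obtain ⟨hj0, hj1⟩ := PySem.List.mem_pyRange_one.mp hj
      rw [pyGetD_append_left l v 0 i hi0 hi1, pyGetD_append_left l v 0 j (by omega) hj1]
    · rw [List.filter_singleton, pyGetD_append_left l v 0 i hi0 hi1, pyGetD_append_self]
      by_cases hc : PySem.List.pyGetD l i 0 = PySem.Int.bxor v 1 <;> simp [hc]
  rw [List.map_congr_left hterm, List.sum_map_add, PySem.List.sum_map_ite_one_zero_nat]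
  congr 1
  exact (count_eq_countP_range l (PySem.Int.bxor v 1)).symm

-- B's counting pass
theorem spB_fst_aux (l : List Int) : ∀ (d : PySem.Dict Int Int) (p : Int),
    (l.foldl (fun sp v =>
      (sp.1.insert v (sp.1.getD v 0 + 1), sp.2 + sp.1.getD (PySem.Int.bxor v 1) 0)) (d, p)).1
    = l.foldl (fun d x => d.insert x (d.getD x 0 + 1)) d := by
  induction l with
  | nil => intro d p; rfl
  | cons x t ih => intro d p; exact ih _ _

theorem spB_fst (l : List Int) :
    (spB l).1 = l.foldl (fun d x => d.insert x (d.getD x 0 + 1)) PySem.Dict.empty := by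
  unfold spB; exact spB_fst_aux l _ _

theorem seen_getD (l : List Int) (w : Int) : (spB l).1.getD w 0 = (l.count w : Int) := by
  rw [spB_fst, PySem.Dict.getD_foldl_insert_add_one]
  simp

theorem spB_snd_append (l : List Int) (v : Int) :
    (spB (l ++ [v])).2 = (spB l).2 + (l.count (PySem.Int.bxor v 1) : Int) := by
  have h : spB (l ++ [v]) = ((spB l).1.insert v ((spB l).1.getD v 0 + 1),
      (spB l).2 + (spB l).1.getD (PySem.Int.bxor v 1) 0) := by
    unfold spB; rw [List.foldl_append]; rfl
  rw [h]
  simp [seen_getD]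

theorem pairs_eq (l : List Int) : (spB l).2 = ((cpA l).length : Int) := by
  induction l using List.reverseRecOn with
  | nil => rfl
  | append_singleton t v ih =>
    rw [spB_snd_append, cpA_len_append, ih]
    push_cast
    ring

-- membership in the problematic set
theorem mem_fold_add2 (L : List (Int × Int)) : ∀ (s : PySem.Set Int) (y : Int),
    (y ∈ L.foldl (fun s ij => PySem.Set.add (PySem.Set.add s ij.1) ij.2) s) ↔
      y ∈ s ∨ ∃ ij ∈ L, y = ij.1 ∨ y = ij.2 := by
  induction L with
  | nil => simp
  | cons r t ih =>
    intro s y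
    simp only [List.foldl_cons, ih, PySem.Set.mem_add, List.mem_cons]
    constructor
    · rintro (((h | h) | h) | ⟨ij, hij, h⟩)
      · exact Or.inl h
      · exact Or.inr ⟨r, Or.inl rfl, Or.inl h⟩
      · exact Or.inr ⟨r, Or.inl rfl, Or.inr h⟩
      · exact Or.inr ⟨ij, Or.inr hij, h⟩
    · rintro (h | ⟨ij, (rfl | hij), h⟩)
      · exact Or.inl (Or.inl (Or.inl h))
      · rcases h with h | h
        · exact Or.inl (Or.inl (Or.inr h))
        · exact Or.inl (Or.inr h)
      · exact Or.inr ⟨ij, hij, h⟩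

theorem mem_cpA (l : List Int) (i j : Int) :
    ((i, j) ∈ cpA l) ↔ 0 ≤ i ∧ i + 1 ≤ j ∧ j < (l.length : Int) ∧
      PySem.List.pyGetD l i 0 = PySem.Int.bxor (PySem.List.pyGetD l j 0) 1 := by
  rw [cpA_eq]
  simp only [List.mem_flatMap, List.mem_map, List.mem_filter, PySem.List.mem_pyRange_one,
    decide_eq_true_eq]
  constructor
  · rintro ⟨a, ⟨ha0, ha1⟩, b, ⟨⟨hb0, hb1⟩, hcond⟩, heq⟩
    rw [Prod.mk.injEq] at heq
    obtain ⟨rfl, rfl⟩ := heq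
    exact ⟨ha0, by omega, hb1, hcond⟩
  · rintro ⟨h0, h1, h2, hc⟩
    exact ⟨i, ⟨h0, by omega⟩, j, ⟨⟨by omega, h2⟩, hc⟩, rfl⟩

theorem probA_mem (l : List Int) (i : Int) (h0 : 0 ≤ i) (h1 : i < (l.length : Int)) :
    (PySem.Set.contains (probA l) i = true) ↔
      PySem.Int.bxor (PySem.List.pyGetD l i 0) 1 ∈ l := by
  rw [PySem.Set.contains_iff]
  unfold probA
  rw [mem_fold_add2]
  constructor
  · rintro (h | ⟨⟨a, b⟩, hab, h⟩)
    · simp [PySem.Set.empty] at h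
    · rw [mem_cpA] at hab
      obtain ⟨ha0, hlt, hb1, hc⟩ := hab
      rcases h with rfl | rfl
      · rw [hc, bxor_one_invol]
        exact PySem.List.pyGetD_mem l 0 (by constructor <;> omega)
      · rw [← hc]
        exact PySem.List.pyGetD_mem l 0 (by constructor <;> omega)
  · intro h
    obtain ⟨k, hk, hkv⟩ := List.mem_iff_getElem.mp h
    have hkd : PySem.List.pyGetD l (k : Int) 0 = PySem.Int.bxor (PySem.List.pyGetD l i 0) 1 := by
      rw [PySem.List.pyGetD_eq_getElem _ _ (by positivity) (by exact_mod_cast hk)]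
      simpa using hkv
    have hne : (k : Int) ≠ i := by
      intro he
      rw [he] at hkd
      exact bxor_one_ne _ hkd.symm
    by_cases hlt : i < (k : Int)
    · refine Or.inr ⟨(i, (k : Int)), ?_, Or.inl rfl⟩
      rw [mem_cpA]
      exact ⟨h0, by omega, by exact_mod_cast hk, by rw [hkd, bxor_one_invol]⟩
    · refine Or.inr ⟨((k : Int), i), ?_, Or.inr rfl⟩
      rw [mem_cpA]
      exact ⟨by positivity, by omega, h1, hkd⟩

theorem condB (l : List Int) (v : Int) :
    ((spB l).1.getD (PySem.Int.bxor v 1) 0 > 0) ↔ PySem.Int.bxor v 1 ∈ l := by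
  rw [seen_getD]
  exact_mod_cast List.count_pos_iff

-- the two run scanners agree
theorem bestOf_append (L : List (Int × Int)) (r : Int × Int) :
    bestOf (L ++ [r]) = upd (bestOf L) r := by
  unfold bestOf; rw [List.foldl_append]; rfl

theorem upd_collapse (b : Int × Int) (s e : Int) :
    upd (upd b (s, e)) (s, e + 1) = upd b (s, e + 1) := by
  unfold upd
  dsimp only
  split_ifs <;> first | rfl | omega

theorem scan_inv (f : Int → Bool) (k : Nat) :
    ((PySem.List.pyRange 0 (k : Int)).foldl (stepB f) (0, 0, 0)).1
        = ((PySem.List.pyRange 0 (k : Int)).foldl (stepA f) (0, [])).1 ∧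
      0 ≤ ((PySem.List.pyRange 0 (k : Int)).foldl (stepA f) (0, [])).1 ∧
      ((PySem.List.pyRange 0 (k : Int)).foldl (stepA f) (0, [])).1 ≤ (k : Int) ∧
      (∀ r ∈ ((PySem.List.pyRange 0 (k : Int)).foldl (stepA f) (0, [])).2, r.1 ≤ r.2) ∧
      ((PySem.List.pyRange 0 (k : Int)).foldl (stepB f) (0, 0, 0)).2
        = bestOf (((PySem.List.pyRange 0 (k : Int)).foldl (stepA f) (0, [])).2 ++
            (if ((PySem.List.pyRange 0 (k : Int)).foldl (stepA f) (0, [])).1 < (k : Int)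
             then [(((PySem.List.pyRange 0 (k : Int)).foldl (stepA f) (0, [])).1, (k : Int) - 1)]
             else [])) := by
  induction k with
  | zero =>
    rw [show ((0:Nat):Int) = 0 from rfl, PySem.List.pyRange_one_eq_nil (le_refl 0)]
    exact ⟨rfl, le_refl 0, le_refl 0, by simp, by simp [bestOf]⟩
  | succ k ih =>
    obtain ⟨ih1, ih2, ih3, ih4, ih5⟩ := ih
    rw [show ((k+1:Nat):Int) = (k:Int) + 1 by push_cast; ring,
        PySem.List.pyRange_one_succ_right (by positivity)]
    simp only [List.foldl_append, List.foldl_cons, List.foldl_nil]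
    set a := (PySem.List.pyRange 0 (k:Int)).foldl (stepA f) (0, ([] : List (Int × Int))) with ha
    set b := (PySem.List.pyRange 0 (k:Int)).foldl (stepB f) (((0:Int), (0:Int), (0:Int))) with hb
    cases hf : f (k : Int) with
    | true =>
      have hA : stepA f a (k:Int) = ((k:Int) + 1, if a.1 < (k:Int) then a.2 ++ [(a.1, (k:Int) - 1)] else a.2) := by
        unfold stepA; rw [if_pos hf]
      have hB : stepB f b (k:Int) = ((k:Int) + 1, b.2.1, b.2.2) := by
        unfold stepB; rw [if_pos hf]
      rw [hA, hB]
      refine ⟨rfl, by positivity, le_refl _, ?_, ?_⟩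
      · intro r hr
        split_ifs at hr with hc
        · rcases List.mem_append.mp hr with h | h
          · exact ih4 r h
          · simp at h; subst h; dsimp; omega
        · exact ih4 r hr
      · dsimp only
        rw [if_neg (lt_irrefl _), List.append_nil]
        have hlist : (if a.1 < (k:Int) then a.2 ++ [(a.1, (k:Int) - 1)] else a.2)
            = a.2 ++ (if a.1 < (k:Int) then [(a.1, (k:Int) - 1)] else []) := by
          split_ifs <;> simp
        rw [hlist]
        exact ih5
    | false =>
      have hA : stepA f a (k:Int) = a := by unfold stepA; rw [if_neg (by simp [hf])]
      have hB : stepB f b (k:Int) = if (k:Int) - b.1 + 1 > b.2.1 then (b.1, (k:Int) - b.1 + 1, b.1) else b := by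
        unfold stepB; rw [if_neg (by simp [hf])]
      rw [hA, hB]
      have hup : (if (k:Int) - b.1 + 1 > b.2.1 then (b.1, (k:Int) - b.1 + 1, b.1) else b).2
          = upd b.2 (a.1, (k:Int)) := by
        unfold upd; rw [ih1]; dsimp only
        split_ifs <;> first | rfl | omega
      have hfst : (if (k:Int) - b.1 + 1 > b.2.1 then (b.1, (k:Int) - b.1 + 1, b.1) else b).1 = b.1 := by
        split_ifs <;> rfl
      refine ⟨by rw [hfst, ih1], ih2, by omega, ih4, ?_⟩
      rw [hup, if_pos (by omega : a.1 < (k:Int) + 1)]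
      rw [show (k:Int) + 1 - 1 = (k:Int) by ring]
      by_cases hc : a.1 < (k:Int)
      · rw [ih5, if_pos hc, bestOf_append, bestOf_append]
        have := upd_collapse (bestOf a.2) a.1 ((k:Int) - 1)
        rw [show (k:Int) - 1 + 1 = (k:Int) by ring] at this
        exact this
      · have hak : a.1 = (k:Int) := by omega
        rw [ih5, if_neg hc, List.append_nil, bestOf_append]

-- Python's max(ranges, key=end-start) (first extremal) matches the running best
theorem max?_aux (t : List (Int × Int)) : ∀ a, ∃ m,
    PySem.List.max? (a :: t) (fun x : Int × Int => x.2 - x.1) = some m ∧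
    t.foldl upd (a.2 - a.1 + 1, a.1) = (m.2 - m.1 + 1, m.1) := by
  induction t with
  | nil => intro a; exact ⟨a, rfl, rfl⟩
  | cons r t ih =>
    intro a
    have hstep : PySem.List.max? (a :: r :: t) (fun x : Int × Int => x.2 - x.1)
        = PySem.List.max? ((if a.2 - a.1 < r.2 - r.1 then r else a) :: t) (fun x : Int × Int => x.2 - x.1) := by
      unfold PySem.List.max?
      simp only [List.foldl_cons]
      split_ifs <;> rfl
    by_cases h : a.2 - a.1 < r.2 - r.1
    · obtain ⟨m, hm, hb⟩ := ih r
      refine ⟨m, ?_, ?_⟩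
      · rw [hstep, if_pos h, hm]
      · simp only [List.foldl_cons]
        rw [show upd (a.2 - a.1 + 1, a.1) r = (r.2 - r.1 + 1, r.1) from by
          unfold upd; rw [if_pos (by dsimp; omega)]]
        exact hb
    · obtain ⟨m, hm, hb⟩ := ih a
      refine ⟨m, ?_, ?_⟩
      · rw [hstep, if_neg h, hm]
      · simp only [List.foldl_cons]
        rw [show upd (a.2 - a.1 + 1, a.1) r = (a.2 - a.1 + 1, a.1) from by
          unfold upd; rw [if_neg (by dsimp; omega)]]
        exact hb

theorem max?_bestOf (L : List (Int × Int)) (hne : L ≠ []) (hh : ∀ r ∈ L, r.1 ≤ r.2) :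
    ∃ m, PySem.List.max? L (fun x : Int × Int => x.2 - x.1) = some m ∧
      bestOf L = (m.2 - m.1 + 1, m.1) := by
  match L with
  | [] => exact absurd rfl hne
  | x :: t =>
    have hx : x.1 ≤ x.2 := hh x (by simp)
    have h1 : upd (0, 0) x = (x.2 - x.1 + 1, x.1) := by
      unfold upd; rw [if_pos (by dsimp; omega)]
    unfold bestOf
    simp only [List.foldl_cons, h1]
    exact max?_aux t x

-- ===== VERDICT (by name: the statement is the Claim_ definition above) =====
theorem remove_complement_pairs_from_path_spec : Claim_equal_remove_complement_pairs_from_path := by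
  intro path _
  unfold Spec_remove_complement_pairs_from_path
  by_cases hlen : path.length ≤ 1
  · unfold remove_complement_pairs_from_path remove_complement_pairs_from_path_alt
    rw [if_pos hlen, if_pos hlen]
  · rw [portA_spec path hlen, portB_spec path hlen]
    have hpairs := pairs_eq path
    by_cases hcp : cpA path = []
    · rw [if_pos hcp, if_pos (by rw [hpairs, hcp]; rfl)]
    · have hp0 : ¬ (spB path).2 = 0 := by
        rw [hpairs]
        simp only [Int.natCast_eq_zero, List.length_eq_zero_iff]
        exact hcp
      rw [if_neg hcp, if_neg hp0]
      have hA : stA path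
          = (PySem.List.pyRange 0 (path.length : Int)).foldl
              (stepA (fun i => decide (PySem.Int.bxor (PySem.List.pyGetD path i 0) 1 ∈ path))) (0, []) := by
        unfold stA
        apply PySem.List.foldl_congr_mem
        intro acc i hi
        obtain ⟨hi0, hi1⟩ := PySem.List.mem_pyRange_one.mp hi
        unfold stepA
        have hbool : PySem.Set.contains (probA path) i
            = decide (PySem.Int.bxor (PySem.List.pyGetD path i 0) 1 ∈ path) := by
          by_cases hc : PySem.Int.bxor (PySem.List.pyGetD path i 0) 1 ∈ path
          · rw [(probA_mem path i hi0 hi1).mpr hc, decide_eq_true hc]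
          · simp only [hc, decide_false]
            rw [← Bool.not_eq_true, probA_mem path i hi0 hi1]
            exact hc
        rw [hbool]
      have hB : stB path
          = (PySem.List.pyRange 0 (path.length : Int)).foldl
              (stepB (fun i => decide (PySem.Int.bxor (PySem.List.pyGetD path i 0) 1 ∈ path))) (0, 0, 0) := by
        unfold stB
        rw [PySem.List.enumerate_eq_map_pyRange path 0, List.foldl_map]
        simp only [PySem.List.len_eq]
        apply PySem.List.foldl_congr_mem
        intro acc i _
        dsimp only
        unfold stepB
        refine if_congr ?_ rfl rfl
        simp only [gt_iff_lt, decide_eq_true_eq]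
        exact condB path _
      obtain ⟨i1, i2, i3, i4, i5⟩ :=
        scan_inv (fun i => decide (PySem.Int.bxor (PySem.List.pyGetD path i 0) 1 ∈ path)) path.length
      rw [← hA] at i1 i2 i3 i4 i5
      rw [← hB] at i1 i5
      have hvr : vrA path = (stA path).2 ++
          (if (stA path).1 < (path.length : Int) then [((stA path).1, (path.length : Int) - 1)] else []) := by
        unfold vrA
        split_ifs <;> simp
      have hvh : ∀ r ∈ vrA path, r.1 ≤ r.2 := by
        rw [hvr]
        intro r hr
        rcases List.mem_append.mp hr with h | h
        · exact i4 r h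
        · split_ifs at h with hc
          · simp only [List.mem_singleton] at h
            subst h
            dsimp only
            omega
          · simp at h
      rw [← hvr] at i5
      by_cases hvre : vrA path = []
      · rw [hvre, show PySem.List.max? ([] : List (Int × Int)) (fun x => x.2 - x.1) = none from rfl]
        have hb2 : (stB path).2 = ((0 : Int), (0 : Int)) := by
          rw [i5, hvre]
          rfl
        rw [hb2]
        have hsl : PySem.List.slice path (some ((0:Int), (0:Int)).2) (some (((0:Int), (0:Int)).2 + ((0:Int), (0:Int)).1)) = [] := by
          dsimp only
          rw [PySem.List.slice_toNat path (le_refl 0) (by norm_num)]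
          simp
        rw [hsl, hpairs]
      · obtain ⟨m, hmax, hbest⟩ := max?_bestOf (vrA path) hvre hvh
        rw [hmax]
        have hb2 : (stB path).2 = (m.2 - m.1 + 1, m.1) := by rw [i5]; exact hbest
        rw [hb2]
        dsimp only
        rw [show m.1 + (m.2 - m.1 + 1) = m.2 + 1 by ring, hpairs]
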